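-- pv_equiv track=rewrite | github.com/patrickwmurph/nfl-ml-betting-model | helpers/money_line_scraper.py | correct_date
-- ===== SOURCE A (Python) =====
-- def correct_date(date_str, year, prev_date=None):
--     if len(date_str) == 3:
--         formatted_date = f"{year}-0{date_str[0]}-{date_str[1:]}"
--     else:
--         formatted_date = f"{year}-{date_str[:2]}-{date_str[2:]}"
--
--     # Update year if prev date is less than current date
--     if prev_date and formatted_date < prev_date:
--         year = str(int(year) + 1)
--         return correct_date(date_str, year)
--
--     return formatted_date
-- ===== SOURCE B (Python) =====
-- def correct_date(date_str, year, prev_date=None):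
--     # Normalize first: left-pad 3-char dates to 4 chars, then one uniform
--     # slice-and-join, inside a while loop that replaces A's self-recursion.
--     md = "0" + date_str if len(date_str) == 3 else date_str
--     while True:
--         d = "-".join((year, md[:2], md[2:]))
--         if prev_date and d < prev_date:
--             year = str(int(year) + 1)
--             prev_date = None
--         else:
--             return d
-- ===== Notes on version B (the rewrite author's own statement) =====
-- stated objective: simpler
-- what changed: B normalizes first (left-pads a 3-char date to 4 digits) so one uniform slice-and-join replaces A's two branchy f-strings, and an iterative while loop over (year, prev_date) state replaces A's self-recursion.
import Mathlib
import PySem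

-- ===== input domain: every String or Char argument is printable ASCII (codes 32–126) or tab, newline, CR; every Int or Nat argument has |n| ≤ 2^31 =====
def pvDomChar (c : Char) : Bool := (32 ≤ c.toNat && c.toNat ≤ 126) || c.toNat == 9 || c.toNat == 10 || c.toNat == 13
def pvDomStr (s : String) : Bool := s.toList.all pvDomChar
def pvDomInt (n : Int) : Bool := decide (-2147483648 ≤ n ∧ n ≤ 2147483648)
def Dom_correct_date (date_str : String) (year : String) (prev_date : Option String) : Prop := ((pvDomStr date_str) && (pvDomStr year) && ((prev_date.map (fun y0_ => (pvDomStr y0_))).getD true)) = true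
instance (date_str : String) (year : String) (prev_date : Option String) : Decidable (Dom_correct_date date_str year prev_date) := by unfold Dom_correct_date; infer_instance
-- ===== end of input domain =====

-- B normalizes the date digits first (left-pad 3-char input), then builds the result by one
-- uniform slice-and-join inside a while loop that replaces A's branchy f-strings and
-- self-recursion; objective: simpler.

-- ===== PORT A =====
-- literal port of A; recursion is on prev_date (the recursive call passes none, so it stops).
-- date_str[0] is in range in the len==3 branch, so .getD "" is never the taken value there.
def correct_date (date_str : String) (year : String) (prev_date : Option String) : String :=
  let formatted_date :=
    if PySem.Str.len date_str == 3 then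
      year ++ "-0" ++ ((PySem.Str.pyGet? date_str 0).map String.singleton).getD "" ++ "-" ++ PySem.Str.slice date_str (some 1) none
    else
      year ++ "-" ++ PySem.Str.slice date_str none (some 2) ++ "-" ++ PySem.Str.slice date_str (some 2) none
  match prev_date with
  | none => formatted_date
  | some p =>
    if p ≠ "" ∧ formatted_date < p then
      -- int(year) raises ValueError when year is not int-like; Pre_ excludes that, .getD 0 is arbitrary there
      correct_date date_str (PySem.Int.toStr ((PySem.Int.ofStr? year).getD 0 + 1)) none
    else formatted_date
termination_by (match prev_date with | some _ => 1 | none => 0)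
decreasing_by simp

-- ===== PORT B =====
-- Source B's while-True loop: state is (year, prev_date); the iteration that bumps the year
-- sets prev_date to None, so the loop runs again at most once.
def correct_date_loop (md : String) (year : String) (prev_date : Option String) : String :=
  let d := PySem.Str.join "-" [year, PySem.Str.slice md none (some 2), PySem.Str.slice md (some 2) none]
  match prev_date with
  | some p =>
    if p ≠ "" ∧ d < p then
      correct_date_loop md (PySem.Int.toStr ((PySem.Int.ofStr? year).getD 0 + 1)) none
    else d
  | none => d
termination_by (match prev_date with | some _ => 1 | none => 0)
decreasing_by simp

def correct_date_alt (date_str : String) (year : String) (prev_date : Option String) : String :=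
  let md := if PySem.Str.len date_str == 3 then "0" ++ date_str else date_str
  correct_date_loop md year prev_date

-- ===== PRECONDITION & SPEC =====
-- Python's string '<' (lexicographic by code point), kernel-reducible; used by Pre_ only
def charsLt : List Char → List Char → Bool
  | [], [] => false
  | [], _ :: _ => true
  | _ :: _, [] => false
  | a :: as, b :: bs => if a < b then true else if b < a then false else charsLt as bs
-- formatting expression used only by Pre_ (independent of both ports)
def fmtDatePre (date_str : String) (y : String) : String :=
  if PySem.Str.len date_str == 3 then
    y ++ "-0" ++ ((PySem.Str.pyGet? date_str 0).map String.singleton).getD "" ++ "-" ++ PySem.Str.slice date_str (some 1) none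
  else
    y ++ "-" ++ PySem.Str.slice date_str none (some 2) ++ "-" ++ PySem.Str.slice date_str (some 2) none

-- Pre_ excludes exactly the inputs where Python A raises ValueError: `int(year)` is reached
-- (prev_date is truthy and the formatted date compares below it) while year is not int-like.
def Pre_correct_date (date_str : String) (year : String) (prev_date : Option String) : Prop :=
  (match prev_date with
   | none => true
   | some p => !(p != "" && charsLt (fmtDatePre date_str year).toList p.toList) || (PySem.Int.ofStr? year).isSome) = true
instance (date_str : String) (year : String) (prev_date : Option String) : Decidable (Pre_correct_date date_str year prev_date) := by unfold Pre_correct_date; infer_instance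

def pvWitness_correct_date : String × String × Option String := ("101", "2023", some "2023-12-25")

def Spec_correct_date (date_str : String) (year : String) (prev_date : Option String) (out : String) : Prop := out = correct_date_alt date_str year prev_date
instance (date_str : String) (year : String) (prev_date : Option String) (out : String) : Decidable (Spec_correct_date date_str year prev_date out) := by unfold Spec_correct_date; infer_instance

-- ===== CLAIM (what is proved, stated in full; the proofs are below) =====
def Claim_equal_correct_date : Prop := ∀ (date_str : String) (year : String) (prev_date : Option String), Dom_correct_date date_str year prev_date → Pre_correct_date date_str year prev_date → Spec_correct_date date_str year prev_date (correct_date date_str year prev_date)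

-- ===== LEMMAS AND PROOFS =====

-- A's branchy formatted_date (= fmtDatePre's body) equals B's pad-then-slice-and-join string
theorem fmt_eq (s y : String) :
    fmtDatePre s y
  = PySem.Str.join "-" [y,
      PySem.Str.slice (if PySem.Str.len s == 3 then "0" ++ s else s) none (some 2),
      PySem.Str.slice (if PySem.Str.len s == 3 then "0" ++ s else s) (some 2) none] := by
  unfold fmtDatePre
  by_cases h : PySem.Str.len s = 3
  · simp only [h, BEq.rfl, if_true]
    simp only [PySem.Str.len] at h
    rw [← String.toList_inj]
    obtain ⟨a, b, rest, hs⟩ : ∃ a b rest, s.toList = a :: b :: rest := by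
      match hl : s.toList with
      | a :: b :: rest => exact ⟨a, b, rest, rfl⟩
      | [] | [_] => simp [hl] at h
    have hnn : (0:Int) ≤ (rest.length : Int) + 1 := by positivity
    simp [PySem.Str.join, PySem.Str.slice, PySem.Str.pyGet?, hs, PySem.Chars.join,
      PySem.List.slice, PySem.List.pyGet?, PySem.List.pyIdx?, String.toList_append,
      List.intercalate, List.intersperse, hnn]
  · simp only [beq_iff_eq, h, if_false]
    rw [← String.toList_inj]
    simp [PySem.Str.join, PySem.Str.slice, PySem.Chars.join, String.toList_append,
      List.intercalate, List.intersperse]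

theorem corrA_none (ds y : String) : correct_date ds y none = fmtDatePre ds y := by
  rw [correct_date, fmtDatePre]

theorem loop_none (md y : String) :
    correct_date_loop md y none
  = PySem.Str.join "-" [y, PySem.Str.slice md none (some 2), PySem.Str.slice md (some 2) none] := by
  rw [correct_date_loop]

theorem corrB_any (ds y : String) (pd : Option String) :
    correct_date_alt ds y pd
  = (match pd with
     | none => fmtDatePre ds y
     | some p =>
       if p ≠ "" ∧ fmtDatePre ds y < p then
         fmtDatePre ds (PySem.Int.toStr ((PySem.Int.ofStr? y).getD 0 + 1))
       else fmtDatePre ds y) := by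
  unfold correct_date_alt
  cases pd with
  | none => rw [loop_none, fmt_eq]
  | some p =>
    rw [correct_date_loop]
    simp only [loop_none, fmt_eq]

-- ===== VERDICT (by name: the statement is the Claim_ definition above) =====
theorem correct_date_spec : Claim_equal_correct_date := by
  intro date_str year prev_date _ _
  unfold Spec_correct_date
  rw [corrB_any]
  cases prev_date with
  | none => exact corrA_none date_str year
  | some p =>
    rw [correct_date]
    simp only [corrA_none]
    rfl
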